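-- pv_equiv track=rewrite | github.com/gumyr/cq_warehouse | scripts/build_extensions_doc.py | only_header
-- ===== SOURCE A (Python) =====
-- def only_header(python_code: list[str]) -> list[str]:
--     docstring_count = 0
--     filtered_code = []
--     for line in python_code:
--         filtered_code.append(line)
--         if '"""' in line:
--             docstring_count += 1
--         if docstring_count == 2:
--             break
--     return filtered_code
-- ===== SOURCE B (Python) =====
-- def only_header(python_code: list[str]) -> list[str]:
--     idx = [i for i, line in enumerate(python_code) if '"""' in line]
--     if len(idx) >= 2:
--         return python_code[:idx[1] + 1]
--     return python_code[:]
-- ===== Notes on version B (the rewrite author's own statement) =====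
-- stated objective: simpler
-- what changed: Replaces the counting loop with early break by building the list of indices of lines containing the docstring delimiter once, then slicing up to the second such index (or copying the whole list).
import Mathlib
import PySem

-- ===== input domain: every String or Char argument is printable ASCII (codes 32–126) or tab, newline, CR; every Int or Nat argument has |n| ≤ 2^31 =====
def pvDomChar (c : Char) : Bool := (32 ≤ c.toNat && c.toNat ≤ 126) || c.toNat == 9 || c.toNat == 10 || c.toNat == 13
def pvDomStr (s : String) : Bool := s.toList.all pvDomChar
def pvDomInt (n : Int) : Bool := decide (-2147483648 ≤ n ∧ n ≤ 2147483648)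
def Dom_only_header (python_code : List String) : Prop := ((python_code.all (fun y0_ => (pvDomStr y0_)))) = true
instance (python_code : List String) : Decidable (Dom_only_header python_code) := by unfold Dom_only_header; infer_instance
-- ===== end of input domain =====

-- B replaces A's counting loop with an index-list-then-slice decomposition (simpler; same cost).

-- ===== PORT A =====
-- the loop of A: state is docstring_count; appending then breaking once the count reaches 2
def onlyHeaderGo (count : Nat) : List String → List String
  | [] => []
  | line :: rest =>
    let count' := if PySem.Str.isIn "\"\"\"" line then count + 1 else count
    if count' == 2 then [line] else line :: onlyHeaderGo count' rest

def only_header (python_code : List String) : List String :=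
  onlyHeaderGo 0 python_code

-- ===== PORT B =====
def only_header_alt (python_code : List String) : List String :=
  let idx := ((PySem.List.enumerate python_code 0).filter
      (fun p => PySem.Str.isIn "\"\"\"" p.2)).map (fun p => p.1)
  match idx with
  | _ :: j :: _ => PySem.List.slice python_code none (some (j + 1))
  | _ => python_code

-- ===== PRECONDITION & SPEC =====
def Spec_only_header (python_code : List String) (out : List String) : Prop := out = only_header_alt python_code
instance (python_code : List String) (out : List String) : Decidable (Spec_only_header python_code out) := by unfold Spec_only_header; infer_instance

-- ===== CLAIM (what is proved, stated in full; the proofs are below) =====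
def Claim_equal_only_header : Prop := ∀ (python_code : List String), Dom_only_header python_code → Spec_only_header python_code (only_header python_code)

-- ===== LEMMAS AND PROOFS =====

-- natural-number version of B's index list
def idxListNat : List String → List Nat
  | [] => []
  | x :: xs =>
    if PySem.Str.isIn "\"\"\"" x then 0 :: (idxListNat xs).map (· + 1)
    else (idxListNat xs).map (· + 1)

theorem enumerate_filter_map_eq (xs : List String) (s : Int) :
    ((PySem.List.enumerate xs s).filter
      (fun p => PySem.Str.isIn "\"\"\"" p.2)).map (fun p => p.1)
    = (idxListNat xs).map (fun (k : Nat) => ((k : Int) + s)) := by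
  induction xs generalizing s with
  | nil => simp [PySem.List.enumerate_nil, idxListNat]
  | cons x xs ih =>
    rw [PySem.List.enumerate_cons]
    by_cases h : PySem.Str.isIn "\"\"\"" x
    · simp only [List.filter_cons, h, idxListNat, if_true, List.map_cons, List.map_map,
        ih (s + 1)]
      refine congrArg₂ _ (by push_cast; omega) ?_
      apply List.map_congr_left; intro k _; simp [Function.comp]; push_cast; omega
    · simp only [List.filter_cons, h, idxListNat, Bool.false_eq_true,
        if_false, List.map_map]
      rw [ih (s + 1)]
      apply List.map_congr_left; intro k _; simp [Function.comp]; push_cast; omega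

theorem alt_eq_nat (xs : List String) :
    only_header_alt xs = match idxListNat xs with
      | _ :: j :: _ => xs.take (j + 1)
      | _ => xs := by
  unfold only_header_alt
  rw [enumerate_filter_map_eq xs 0]
  match h : idxListNat xs with
  | [] => simp
  | [i] => simp
  | i :: j :: rest =>
    simp only [List.map_cons]
    have h1 : ((j : Int) + 0) + 1 = ((j + 1 : Nat) : Int) := by push_cast; ring
    rw [h1, PySem.List.slice_to_natCast]

theorem go_one_eq (xs : List String) :
    onlyHeaderGo 1 xs = match idxListNat xs with
      | j :: _ => xs.take (j + 1)
      | [] => xs := by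
  induction xs with
  | nil => simp [onlyHeaderGo, idxListNat]
  | cons x xs ih =>
    by_cases h : PySem.Str.isIn "\"\"\"" x
    · simp only [onlyHeaderGo, idxListNat, h, if_true]
      simp [List.take_succ_cons]
    · simp only [onlyHeaderGo, idxListNat, h, Bool.false_eq_true, if_false]
      rw [if_neg (by decide), ih]
      match hL : idxListNat xs with
      | [] => simp
      | j :: rest => simp [List.take_succ_cons]

theorem go_zero_eq (xs : List String) :
    onlyHeaderGo 0 xs = match idxListNat xs with
      | _ :: j :: _ => xs.take (j + 1)
      | _ => xs := by
  induction xs with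
  | nil => simp [onlyHeaderGo, idxListNat]
  | cons x xs ih =>
    by_cases h : PySem.Str.isIn "\"\"\"" x
    · simp only [onlyHeaderGo, idxListNat, h, if_true]
      rw [if_neg (by decide), go_one_eq]
      match hL : idxListNat xs with
      | [] => simp
      | j :: rest => simp [List.take_succ_cons]
    · simp only [onlyHeaderGo, idxListNat, h, Bool.false_eq_true, if_false]
      rw [if_neg (by decide), ih]
      match hL : idxListNat xs with
      | [] => simp
      | [j] => simp
      | j0 :: j1 :: rest => simp [List.take_succ_cons]

-- ===== VERDICT (by name: the statement is the Claim_ definition above) =====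
theorem only_header_spec : Claim_equal_only_header := by
  intro xs _
  unfold Spec_only_header only_header
  rw [go_zero_eq, alt_eq_nat]
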